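-- pv_equiv track=rewrite | github.com/sachinsahoo98/Test_Repository_Code | Strings/gfg_q6_strings.py | UppercaseConvertWithoutSpaces
-- ===== SOURCE A (Python) =====
-- def UppercaseConvertWithoutSpaces(testStr):
--     outStr = "".join(testStr.split())
--     length = len(testStr)
--     index = 0
--     outputStr= ""
--     for char in outStr:
--         if index >= length//2:
--             outputStr+=char.upper()
--         else:
--             outputStr += char
--         index+=1
--     return outputStr
-- ===== SOURCE B (Python) =====
-- def UppercaseConvertWithoutSpaces(testStr):
--     s = "".join(testStr.split())
--     cut = len(testStr) // 2
--     return s[:cut] + s[cut:].upper()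
-- ===== Notes on version B (the rewrite author's own statement) =====
-- stated objective: simpler
-- what changed: Replaces the per-character loop with an index counter, a branch and string += by one bulk slice at len(testStr)//2 plus a single .upper() on the suffix.
import Mathlib
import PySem

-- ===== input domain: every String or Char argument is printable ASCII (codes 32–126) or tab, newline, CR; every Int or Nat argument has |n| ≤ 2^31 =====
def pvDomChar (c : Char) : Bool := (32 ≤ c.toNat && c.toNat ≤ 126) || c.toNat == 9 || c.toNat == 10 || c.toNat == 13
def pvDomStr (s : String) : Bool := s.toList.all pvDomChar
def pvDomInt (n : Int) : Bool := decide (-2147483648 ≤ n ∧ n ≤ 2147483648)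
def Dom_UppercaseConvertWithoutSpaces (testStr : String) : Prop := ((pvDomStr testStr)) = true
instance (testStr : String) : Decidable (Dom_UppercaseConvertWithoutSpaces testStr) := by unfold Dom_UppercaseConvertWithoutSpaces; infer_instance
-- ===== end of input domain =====

-- B replaces A's per-character loop with an index counter and branch by one bulk slice at
-- len(testStr)//2 plus a single .upper() call on the suffix (objective: simpler).

-- ===== PORT A =====
def UppercaseConvertWithoutSpaces (testStr : String) : String :=
  let outStr : List Char := PySem.Chars.join [] (PySem.Chars.split₀ testStr.toList)
  let length : Int := PySem.Str.len testStr
  let r := outStr.foldl (fun (st : Int × List Char) char =>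
      if st.1 ≥ PySem.Int.floordiv length 2 then
        (st.1 + 1, st.2 ++ [PySem.Chars.upperChar char])
      else
        (st.1 + 1, st.2 ++ [char])) (0, ([] : List Char))
  String.ofList r.2

-- ===== PORT B =====
def UppercaseConvertWithoutSpaces_alt (testStr : String) : String :=
  let s : List Char := PySem.Chars.join [] (PySem.Chars.split₀ testStr.toList)
  let cut : Int := PySem.Int.floordiv (PySem.Str.len testStr) 2
  String.ofList (PySem.List.slice s none (some cut) ++
             PySem.Chars.upper (PySem.List.slice s (some cut) none))

-- ===== PRECONDITION & SPEC =====
def Spec_UppercaseConvertWithoutSpaces (testStr : String) (out : String) : Prop := out = UppercaseConvertWithoutSpaces_alt testStr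
instance (testStr : String) (out : String) : Decidable (Spec_UppercaseConvertWithoutSpaces testStr out) := by unfold Spec_UppercaseConvertWithoutSpaces; infer_instance

-- ===== CLAIM (what is proved, stated in full; the proofs are below) =====
def Claim_equal_UppercaseConvertWithoutSpaces : Prop := ∀ (testStr : String), Dom_UppercaseConvertWithoutSpaces testStr → Spec_UppercaseConvertWithoutSpaces testStr (UppercaseConvertWithoutSpaces testStr)

-- ===== LEMMAS AND PROOFS =====

-- A's loop, started at index j with accumulator acc, keeps the first (cut - j) remaining
-- characters and uppercases the rest.
theorem pv_loop (cut : Int) (hcut : 0 ≤ cut) (cs : List Char) (j : Nat) (hj : cut ≤ (j:Int) ∨ j ≤ cut.toNat) (acc : List Char) :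
    (cs.foldl (fun (st : Int × List Char) char =>
        if st.1 ≥ cut then (st.1 + 1, st.2 ++ [PySem.Chars.upperChar char])
        else (st.1 + 1, st.2 ++ [char])) ((j:Int), acc)).2
    = acc ++ cs.take (cut.toNat - j) ++ (cs.drop (cut.toNat - j)).map PySem.Chars.upperChar := by
  induction cs generalizing j acc with
  | nil => simp
  | cons c cs ih =>
    by_cases h : (j:Int) ≥ cut
    · have h0 : cut.toNat - j = 0 := by omega
      have hj1 : cut ≤ ((j+1 : Nat):Int) := by push_cast; omega
      have := ih (j+1) (Or.inl hj1) (acc ++ [PySem.Chars.upperChar c])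
      push_cast at this
      simp only [show cut.toNat - (j+1) = 0 from by omega, List.take_zero, List.drop_zero] at this
      simp only [List.foldl_cons, h, ge_iff_le, h0, List.take_zero, List.drop_zero]
      simpa using this
    · have hlt : (j:Int) < cut := by omega
      have hj2 : j + 1 ≤ cut.toNat := by omega
      have h0 : cut.toNat - j = (cut.toNat - (j+1)) + 1 := by omega
      have := ih (j+1) (Or.inr hj2) (acc ++ [c])
      push_cast at this
      simp only [List.foldl_cons, ge_iff_le, if_neg (by omega : ¬ cut ≤ (j:Int))]
      rw [h0]
      simpa using this

-- ===== VERDICT (by name: the statement is the Claim_ definition above) =====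
theorem UppercaseConvertWithoutSpaces_spec : Claim_equal_UppercaseConvertWithoutSpaces := by
  intro testStr _
  unfold Spec_UppercaseConvertWithoutSpaces UppercaseConvertWithoutSpaces UppercaseConvertWithoutSpaces_alt
  simp only []
  set s : List Char := PySem.Chars.join [] (PySem.Chars.split₀ testStr.toList) with hs
  have hlen : PySem.Str.len testStr = ((testStr.toList.length : Nat) : Int) := PySem.Str.len_eq testStr
  set cut : Int := PySem.Int.floordiv (PySem.Str.len testStr) 2 with hc
  have hfd : PySem.Int.floordiv ((testStr.toList.length : Nat) : Int) 2 = ((testStr.toList.length / 2 : Nat) : Int) := by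
    exact_mod_cast PySem.Int.floordiv_natCast testStr.toList.length 2
  have hcut : 0 ≤ cut := by
    rw [hc, hlen, hfd]; exact Int.natCast_nonneg _
  have hloop := pv_loop cut hcut s 0 (Or.inr (Nat.zero_le _)) []
  simp only [Nat.cast_zero, Nat.sub_zero, List.nil_append] at hloop
  rw [hloop]
  rw [PySem.List.slice_to _ hcut, PySem.List.slice_from _ hcut]
  simp [PySem.Chars.upper]
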